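-- pv_equiv track=rewrite | github.com/ClementCollignon/Erratic-Vases | EVG_clean.py | append_side_faces
-- ===== SOURCE A (Python) =====
-- def get_side_face_uptriangle(index_z, index_theta, number_points_theta, zoffset):
--     index_1 = index_theta + index_z * number_points_theta + 1
--     index_2 = index_1 + 1
--     index_3 = index_1 + number_points_theta
--     if index_z % 2 != 0:
--         index_3 += 1
--
--     if index_2 == ( index_z + 1 ) * number_points_theta + 1:
--             index_2 = index_1 - index_theta
--
--     if index_3 == ( index_z + 2 ) * number_points_theta + 1:
--         index_3 = ( index_z + 1 ) * number_points_theta + 1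
--
--     if int(zoffset)==0:
--         return [index_1, index_2, index_3]
--     return [index_1,index_3,index_2]
--
-- def get_side_face_downtriangle(index_z, index_theta, number_points_theta, zoffset):
--     index_1 = index_theta + index_z * number_points_theta + 1
--     index_2 = index_1 + number_points_theta
--     index_3 = index_2 + 1
--     if index_z %2 == 0:
--         index_1 += 1
--
--     if index_1 == index_2 - index_theta:
--         index_1 = index_z * number_points_theta + 1
--     if index_3 == ( index_z + 2 ) * number_points_theta + 1:
--         index_3 = ( index_z + 1 ) * number_points_theta + 1
--
--     if int(zoffset)==0:
--         return [index_1, index_3, index_2]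
--     return [index_1, index_2, index_3]
--
-- def append_side_faces(faces, zoffset, number_points_z, number_points_theta):
--     for i in range(number_points_z-1):
--         for j in range(number_points_theta):
--             face_up   = get_side_face_uptriangle(i, j, number_points_theta, zoffset)
--             face_down = get_side_face_downtriangle(i, j, number_points_theta, zoffset)
--             faces.append(face_up)
--             faces.append(face_down)
--     return faces
-- ===== SOURCE B (Python) =====
-- def append_side_faces(faces, zoffset, number_points_z, number_points_theta):
--     # Build one template row of 2n triangles per row parity once, then translate
--     # that template by i*n+1 for each grid row (same faces in the same order).
--     if number_points_z <= 1:
--         return faces  # no rows: nothing to append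
--     n = number_points_theta
--     swap = int(zoffset) != 0
--
--     def row_template(p):
--         t = []
--         for j in range(n):
--             up = [j, (j + 1) % n, n + (j + p) % n]
--             dn = [(j + 1 - p) % n, n + j, n + (j + 1) % n]
--             if swap:
--                 t.append([up[0], up[2], up[1]])
--                 t.append([dn[0], dn[1], dn[2]])
--             else:
--                 t.append([up[0], up[1], up[2]])
--                 t.append([dn[0], dn[2], dn[1]])
--         return t
--
--     templates = (row_template(0), row_template(1))
--     for i in range(number_points_z - 1):
--         base = i * n + 1
--         faces.extend([v + base for v in tri] for tri in templates[i % 2])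
--     return faces
-- ===== Notes on version B (the rewrite author's own statement) =====
-- stated objective: alternative
-- what changed: B precomputes a per-parity template row of 2n offset triangles once (with modular wrap instead of A's equality fix-up branches) and then produces every grid row by translating that template by i*n+1, replacing A's per-cell helper calls with a build-template-then-translate pass.
import Mathlib
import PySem

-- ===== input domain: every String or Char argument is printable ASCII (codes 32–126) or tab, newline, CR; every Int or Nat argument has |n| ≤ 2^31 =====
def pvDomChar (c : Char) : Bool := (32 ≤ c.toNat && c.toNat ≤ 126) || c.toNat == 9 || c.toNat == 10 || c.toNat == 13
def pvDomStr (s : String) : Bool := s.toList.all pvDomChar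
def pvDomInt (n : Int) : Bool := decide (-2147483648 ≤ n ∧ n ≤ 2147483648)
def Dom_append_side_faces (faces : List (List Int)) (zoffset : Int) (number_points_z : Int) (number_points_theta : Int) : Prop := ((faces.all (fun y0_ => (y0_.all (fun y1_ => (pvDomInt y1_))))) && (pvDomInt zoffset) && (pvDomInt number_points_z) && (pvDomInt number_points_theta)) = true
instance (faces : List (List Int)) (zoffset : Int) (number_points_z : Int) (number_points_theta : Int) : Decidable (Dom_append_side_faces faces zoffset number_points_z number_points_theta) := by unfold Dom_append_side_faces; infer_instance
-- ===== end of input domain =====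

-- B builds one template row of triangle index-offsets per row parity (with modular wrap)
-- and translates it by i*n+1 for each grid row, instead of A's per-cell helper calls with
-- equality-based wrap fix-ups (objective: alternative). Python A mutates `faces` in place
-- and so does Python B; the equivalence proved here is about the return value.

-- ===== PORT A =====
def get_side_face_uptriangle (index_z index_theta number_points_theta zoffset : Int) : List Int :=
  let index_1 := index_theta + index_z * number_points_theta + 1
  let index_2 := index_1 + 1
  let index_3 := index_1 + number_points_theta
  let index_3 := if PySem.Int.mod index_z 2 ≠ 0 then index_3 + 1 else index_3
  let index_2 := if index_2 = (index_z + 1) * number_points_theta + 1 then index_1 - index_theta else index_2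
  let index_3 := if index_3 = (index_z + 2) * number_points_theta + 1 then (index_z + 1) * number_points_theta + 1 else index_3
  if zoffset = 0 then [index_1, index_2, index_3] else [index_1, index_3, index_2]

def get_side_face_downtriangle (index_z index_theta number_points_theta zoffset : Int) : List Int :=
  let index_1 := index_theta + index_z * number_points_theta + 1
  let index_2 := index_1 + number_points_theta
  let index_3 := index_2 + 1
  let index_1 := if PySem.Int.mod index_z 2 = 0 then index_1 + 1 else index_1
  let index_1 := if index_1 = index_2 - index_theta then index_z * number_points_theta + 1 else index_1
  let index_3 := if index_3 = (index_z + 2) * number_points_theta + 1 then (index_z + 1) * number_points_theta + 1 else index_3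
  if zoffset = 0 then [index_1, index_3, index_2] else [index_1, index_2, index_3]

def append_side_faces (faces : List (List Int)) (zoffset : Int) (number_points_z : Int) (number_points_theta : Int) : List (List Int) :=
  (PySem.List.pyRange 0 (number_points_z - 1) 1).foldl (fun fs i =>
    (PySem.List.pyRange 0 number_points_theta 1).foldl (fun fs j =>
      fs ++ [get_side_face_uptriangle i j number_points_theta zoffset]
         ++ [get_side_face_downtriangle i j number_points_theta zoffset]) fs) faces

-- ===== PORT B =====
def row_template (swap : Bool) (n p : Int) : List (List Int) :=
  (PySem.List.pyRange 0 n 1).foldl (fun t j =>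
    let up := [j, PySem.Int.mod (j + 1) n, n + PySem.Int.mod (j + p) n]
    let dn := [PySem.Int.mod (j + 1 - p) n, n + j, n + PySem.Int.mod (j + 1) n]
    if swap then
      t ++ [[up[0]!, up[2]!, up[1]!]] ++ [[dn[0]!, dn[1]!, dn[2]!]]
    else
      t ++ [[up[0]!, up[1]!, up[2]!]] ++ [[dn[0]!, dn[2]!, dn[1]!]]) []

def append_side_faces_alt (faces : List (List Int)) (zoffset : Int) (number_points_z : Int) (number_points_theta : Int) : List (List Int) :=
  if number_points_z ≤ 1 then faces else
  let n := number_points_theta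
  let swap : Bool := decide (zoffset ≠ 0)
  let t0 := row_template swap n 0
  let t1 := row_template swap n 1
  (PySem.List.pyRange 0 (number_points_z - 1) 1).foldl (fun fs i =>
    let base := i * n + 1
    fs ++ ((if PySem.Int.mod i 2 = 0 then t0 else t1).map (fun tri => tri.map (fun v => v + base)))) faces

-- ===== PRECONDITION & SPEC =====
def Spec_append_side_faces (faces : List (List Int)) (zoffset : Int) (number_points_z : Int) (number_points_theta : Int) (out : List (List Int)) : Prop := out = append_side_faces_alt faces zoffset number_points_z number_points_theta
instance (faces : List (List Int)) (zoffset : Int) (number_points_z : Int) (number_points_theta : Int) (out : List (List Int)) : Decidable (Spec_append_side_faces faces zoffset number_points_z number_points_theta out) := by unfold Spec_append_side_faces; infer_instance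

-- ===== CLAIM =====
def Claim_equal_append_side_faces : Prop := ∀ (faces : List (List Int)) (zoffset : Int) (number_points_z : Int) (number_points_theta : Int), Dom_append_side_faces faces zoffset number_points_z number_points_theta → Spec_append_side_faces faces zoffset number_points_z number_points_theta (append_side_faces faces zoffset number_points_z number_points_theta)

-- ===== LEMMAS AND PROOFS =====

lemma flatMap_congr_mem {α β : Type} {l : List α} {f g : α → List β}
    (h : ∀ x ∈ l, f x = g x) : l.flatMap f = l.flatMap g := by
  induction l with
  | nil => rfl
  | cons a l ih =>
    simp only [List.flatMap_cons, h a (List.mem_cons_self),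
      ih (fun x hx => h x (List.mem_cons_of_mem a hx))]

lemma wrapIf (n k : Int) (_hn : 0 < n) (h0 : 0 ≤ k) (h1 : k ≤ n) : k % n = if k = n then 0 else k := by
  split_ifs with h
  · simp [h]
  · exact Int.emod_eq_of_lt h0 (by omega)

-- A's up-triangle for cell (i,j) is B's template up-triangle shifted by i*n+1.
lemma up_eq (z n i j : Int) (hj0 : 0 ≤ j) (hjn : j < n) :
    get_side_face_uptriangle i j n z =
    (if z = 0 then
       [j + (i * n + 1), PySem.Int.mod (j + 1) n + (i * n + 1),
        n + PySem.Int.mod (j + PySem.Int.mod i 2) n + (i * n + 1)]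
     else
       [j + (i * n + 1), n + PySem.Int.mod (j + PySem.Int.mod i 2) n + (i * n + 1),
        PySem.Int.mod (j + 1) n + (i * n + 1)]) := by
  have hn : 0 < n := lt_of_le_of_lt hj0 hjn
  simp only [get_side_face_uptriangle, PySem.Int.mod_eq_emod_of_pos hn,
    PySem.Int.mod_eq_emod_of_pos (show (0:Int) < 2 by norm_num)]
  have hp : 0 ≤ i % 2 ∧ i % 2 ≤ 1 := by omega
  rw [wrapIf n (j + 1) hn (by omega) (by omega), wrapIf n (j + i % 2) hn (by omega) (by omega),
    show ((i:Int) + 1) * n = i * n + n by ring, show ((i:Int) + 2) * n = i * n + (n + n) by ring]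
  split_ifs <;> simp only [List.cons.injEq, and_true] <;> omega

-- A's down-triangle for cell (i,j) is B's template down-triangle shifted by i*n+1.
lemma down_eq (z n i j : Int) (hj0 : 0 ≤ j) (hjn : j < n) :
    get_side_face_downtriangle i j n z =
    (if z = 0 then
       [PySem.Int.mod (j + 1 - PySem.Int.mod i 2) n + (i * n + 1),
        n + PySem.Int.mod (j + 1) n + (i * n + 1), n + j + (i * n + 1)]
     else
       [PySem.Int.mod (j + 1 - PySem.Int.mod i 2) n + (i * n + 1),
        n + j + (i * n + 1), n + PySem.Int.mod (j + 1) n + (i * n + 1)]) := by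
  have hn : 0 < n := lt_of_le_of_lt hj0 hjn
  simp only [get_side_face_downtriangle, PySem.Int.mod_eq_emod_of_pos hn,
    PySem.Int.mod_eq_emod_of_pos (show (0:Int) < 2 by norm_num)]
  have hp : 0 ≤ i % 2 ∧ i % 2 ≤ 1 := by omega
  rw [wrapIf n (j + 1) hn (by omega) (by omega), wrapIf n (j + 1 - i % 2) hn (by omega) (by omega),
    show ((i:Int) + 1) * n = i * n + n by ring, show ((i:Int) + 2) * n = i * n + (n + n) by ring]
  split_ifs <;> simp only [List.cons.injEq, and_true] <;> omega

-- The template, written as a flatMap over the theta range.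
lemma row_template_flatMap (swap : Bool) (n p : Int) :
    row_template swap n p = (PySem.List.pyRange 0 n 1).flatMap (fun j =>
      if swap then
        [[j, n + PySem.Int.mod (j + p) n, PySem.Int.mod (j + 1) n],
         [PySem.Int.mod (j + 1 - p) n, n + j, n + PySem.Int.mod (j + 1) n]]
      else
        [[j, PySem.Int.mod (j + 1) n, n + PySem.Int.mod (j + p) n],
         [PySem.Int.mod (j + 1 - p) n, n + PySem.Int.mod (j + 1) n, n + j]]) := by
  unfold row_template
  rw [PySem.List.foldl_congr_mem _ _ (fun t j => t ++
      (if swap then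
        [[j, n + PySem.Int.mod (j + p) n, PySem.Int.mod (j + 1) n],
         [PySem.Int.mod (j + 1 - p) n, n + j, n + PySem.Int.mod (j + 1) n]]
      else
        [[j, PySem.Int.mod (j + 1) n, n + PySem.Int.mod (j + p) n],
         [PySem.Int.mod (j + 1 - p) n, n + PySem.Int.mod (j + 1) n, n + j]])) _
    (by intro acc x _; cases swap <;> simp)]
  rw [PySem.List.foldl_append_eq_flatMap]
  simp

-- One grid row of A equals one translated template row of B.
lemma row_eq (z n i : Int) :
    (PySem.List.pyRange 0 n 1).flatMap (fun j =>
      [get_side_face_uptriangle i j n z, get_side_face_downtriangle i j n z]) =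
    ((if PySem.Int.mod i 2 = 0 then row_template (decide (z ≠ 0)) n 0
      else row_template (decide (z ≠ 0)) n 1).map (fun tri => tri.map (fun v => v + (i * n + 1)))) := by
  have hset : (if PySem.Int.mod i 2 = 0 then row_template (decide (z ≠ 0)) n 0
      else row_template (decide (z ≠ 0)) n 1) = row_template (decide (z ≠ 0)) n (PySem.Int.mod i 2) := by
    have h2 : PySem.Int.mod i 2 = i % 2 := PySem.Int.mod_eq_emod_of_pos (by norm_num)
    rcases show PySem.Int.mod i 2 = 0 ∨ PySem.Int.mod i 2 = 1 by rw [h2]; omega with h | h <;>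
      rw [h] <;> simp
  rw [hset, row_template_flatMap, List.map_flatMap]
  apply flatMap_congr_mem
  intro j hj
  obtain ⟨hj0, hjn⟩ := (PySem.List.mem_pyRange_one).1 hj
  rw [up_eq z n i j hj0 hjn, down_eq z n i j hj0 hjn]
  by_cases hz : z = 0 <;> simp [hz]

-- ===== VERDICT =====
theorem append_side_faces_spec : Claim_equal_append_side_faces := by
  intro faces z nz nt _
  unfold Spec_append_side_faces append_side_faces append_side_faces_alt
  by_cases hz1 : nz ≤ 1
  · have : PySem.List.pyRange 0 (nz - 1) 1 = [] := by
      apply List.eq_nil_of_length_eq_zero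
      rw [PySem.List.length_pyRange_one]; omega
    simp [hz1, this]
  simp only [if_neg hz1]
  refine PySem.List.foldl_congr_mem _ _ _ _ ?_
  intro acc i _
  rw [PySem.List.foldl_congr_mem _ _ (fun fs j => fs ++
      [get_side_face_uptriangle i j nt z, get_side_face_downtriangle i j nt z]) _
    (by intro a x _; simp),
    PySem.List.foldl_append_eq_flatMap, row_eq z nt i]
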